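-- pv_equiv track=rewrite | github.com/MikeBeller/advent | 2022/10/202210.py | proc
-- ===== SOURCE A (Python) =====
-- def proc(prog):
--   X = 1
--   cycle = 1
--   yield cycle, X
--   for inst in prog:
--     if inst is None:
--       cycle += 1
--       yield cycle, X
--     else:
--       cycle += 1
--       yield cycle, X
--       X += inst
--       cycle += 1
--       yield cycle, X
-- ===== SOURCE B (Python) =====
-- def _deltas(prog):
--     for inst in prog:
--         if inst is None:
--             yield 0
--         else:
--             yield 0
--             yield inst
--
-- def proc(prog):
--     X = 1
--     cycle = 1
--     yield cycle, X
--     for d in _deltas(prog):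
--         X += d
--         cycle += 1
--         yield cycle, X
-- ===== Notes on version B (the rewrite author's own statement) =====
-- stated objective: alternative
-- what changed: Splits the simulation into two lazy passes: an inner generator expands each instruction into per-cycle deltas (0 for noop, 0 then v for addx), and the outer loop is a single uniform accumulation X += d emitting one pair per delta, replacing A's two-yield branch inside one loop.
import Mathlib
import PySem

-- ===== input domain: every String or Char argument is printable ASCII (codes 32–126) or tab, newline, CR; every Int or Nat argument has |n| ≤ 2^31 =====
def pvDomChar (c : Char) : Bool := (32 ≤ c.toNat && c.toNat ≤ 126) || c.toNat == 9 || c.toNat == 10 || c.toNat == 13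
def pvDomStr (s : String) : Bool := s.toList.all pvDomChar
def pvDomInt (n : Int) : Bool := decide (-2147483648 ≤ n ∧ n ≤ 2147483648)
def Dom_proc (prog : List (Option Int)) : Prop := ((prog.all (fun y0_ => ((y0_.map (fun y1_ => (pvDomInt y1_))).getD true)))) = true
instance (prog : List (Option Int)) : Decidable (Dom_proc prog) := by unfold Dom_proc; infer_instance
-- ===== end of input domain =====

-- B splits the simulation into a per-cycle delta expansion and one uniform accumulation loop (objective: alternative decomposition, same cost).

-- ===== PORT A =====
-- A: X=1, cycle=1, yield (1,1); per instruction, noop yields one pair, addx yields two and updates X.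
def proc (prog : List (Option Int)) : List (Int × Int) :=
  let s := prog.foldl
    (fun (s : Int × Int × List (Int × Int)) inst =>
      match inst with
      | none => (s.1, s.2.1 + 1, s.2.2 ++ [(s.2.1 + 1, s.1)])
      | some v => (s.1 + v, s.2.1 + 2, s.2.2 ++ [(s.2.1 + 1, s.1), (s.2.1 + 2, s.1 + v)]))
    (1, 1, [((1 : Int), (1 : Int))])
  s.2.2

-- ===== PORT B =====
-- inner generator: per-cycle deltas (0 for noop, 0 then v for addx)
def pvDeltas (prog : List (Option Int)) : List Int :=
  prog.flatMap (fun inst => match inst with | none => [0] | some v => [0, v])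

-- outer loop: uniform accumulation over the delta stream
def proc_alt (prog : List (Option Int)) : List (Int × Int) :=
  let s := (pvDeltas prog).foldl
    (fun (s : Int × Int × List (Int × Int)) d =>
      (s.1 + d, s.2.1 + 1, s.2.2 ++ [(s.2.1 + 1, s.1 + d)]))
    (1, 1, [((1 : Int), (1 : Int))])
  s.2.2

-- ===== PRECONDITION & SPEC =====
def Spec_proc (prog : List (Option Int)) (out : List (Int × Int)) : Prop := out = proc_alt prog
instance (prog : List (Option Int)) (out : List (Int × Int)) : Decidable (Spec_proc prog out) := by unfold Spec_proc; infer_instance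

-- ===== CLAIM (what is proved, stated in full; the proofs are below) =====
def Claim_equal_proc : Prop := ∀ (prog : List (Option Int)), Dom_proc prog → Spec_proc prog (proc prog)

-- ===== LEMMAS AND PROOFS =====
theorem proc_fold_eq (prog : List (Option Int)) :
    ∀ (s : Int × Int × List (Int × Int)),
      prog.foldl
        (fun (s : Int × Int × List (Int × Int)) inst =>
          match inst with
          | none => (s.1, s.2.1 + 1, s.2.2 ++ [(s.2.1 + 1, s.1)])
          | some v => (s.1 + v, s.2.1 + 2, s.2.2 ++ [(s.2.1 + 1, s.1), (s.2.1 + 2, s.1 + v)])) s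
      = (pvDeltas prog).foldl
        (fun (s : Int × Int × List (Int × Int)) d =>
          (s.1 + d, s.2.1 + 1, s.2.2 ++ [(s.2.1 + 1, s.1 + d)])) s := by
  induction prog with
  | nil => intro s; rfl
  | cons inst rest ih =>
    intro s
    cases inst with
    | none =>
      simp only [pvDeltas, List.flatMap_cons, List.foldl_append, List.foldl] at *
      rw [ih]
      simp
    | some v =>
      simp only [pvDeltas, List.flatMap_cons, List.foldl_append, List.foldl] at *
      rw [ih]
      simp
      ring_nf

-- ===== VERDICT (by name: the statement is the Claim_ definition above) =====
theorem proc_spec : Claim_equal_proc := by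
  intro prog _
  unfold Spec_proc proc proc_alt
  rw [proc_fold_eq]
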